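-- pv_equiv track=rewrite | github.com/Djordje-Stojanovic/StockIQ | src/agents/valuation_agent.py | _get_expertise_depth_config
-- ===== SOURCE A (Python) =====
-- def _get_expertise_depth_config(expertise_level: int) -> dict:
--     """Map expertise level to analysis depth configuration."""
--     depth_map = {
--         (1, 2): {"depth_name": "Foundational", "pages": "250-300", "detail": "comprehensive"},
--         (3, 4): {"depth_name": "Educational", "pages": "150-200", "detail": "detailed"},
--         (5, 6): {"depth_name": "Intermediate", "pages": "80-100", "detail": "focused"},
--         (7, 8): {"depth_name": "Advanced", "pages": "50-60", "detail": "executive"},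
--         (9, 10): {"depth_name": "Executive", "pages": "10-20", "detail": "summary"}
--     }
--
--     for level_range, config in depth_map.items():
--         if level_range[0] <= expertise_level <= level_range[1]:
--             return config
--
--     return {"depth_name": "Intermediate", "pages": "80-100", "detail": "focused"}
-- ===== SOURCE B (Python) =====
-- def _get_expertise_depth_config(expertise_level: int) -> dict:
--     """Map expertise level to analysis depth configuration."""
--     configs = [
--         {"depth_name": "Foundational", "pages": "250-300", "detail": "comprehensive"},
--         {"depth_name": "Educational", "pages": "150-200", "detail": "detailed"},
--         {"depth_name": "Intermediate", "pages": "80-100", "detail": "focused"},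
--         {"depth_name": "Advanced", "pages": "50-60", "detail": "executive"},
--         {"depth_name": "Executive", "pages": "10-20", "detail": "summary"},
--     ]
--     idx = (expertise_level - 1) // 2
--     if 0 <= idx <= 4:
--         return configs[idx]
--     return {"depth_name": "Intermediate", "pages": "80-100", "detail": "focused"}
-- ===== Notes on version B (the rewrite author's own statement) =====
-- stated objective: simpler
-- what changed: Replaced the scan over a dict of (lo,hi) ranges with a closed-form bucket index (floor-halving the shifted level) into an ordered config list, guarded for out-of-range levels.
import Mathlib
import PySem

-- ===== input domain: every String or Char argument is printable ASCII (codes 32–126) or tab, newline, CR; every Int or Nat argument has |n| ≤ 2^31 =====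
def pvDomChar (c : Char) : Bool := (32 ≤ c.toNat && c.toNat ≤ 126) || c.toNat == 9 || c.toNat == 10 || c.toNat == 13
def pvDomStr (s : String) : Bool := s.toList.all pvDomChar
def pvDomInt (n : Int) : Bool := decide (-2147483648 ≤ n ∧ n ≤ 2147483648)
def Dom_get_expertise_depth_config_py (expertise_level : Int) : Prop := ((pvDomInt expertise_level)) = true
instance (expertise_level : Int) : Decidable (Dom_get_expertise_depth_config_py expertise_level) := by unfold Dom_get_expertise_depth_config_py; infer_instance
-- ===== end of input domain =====

-- B replaces A's scan over (lo,hi) ranges by a closed-form bucket index (level-1)//2 into an ordered config list (objective: simpler).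

-- ===== PORT A =====
-- the dict literal, as an association list in insertion order
def pvDepthMap : List ((Int × Int) × List (String × String)) :=
  [ ((1, 2), [("depth_name", "Foundational"), ("pages", "250-300"), ("detail", "comprehensive")])
  , ((3, 4), [("depth_name", "Educational"), ("pages", "150-200"), ("detail", "detailed")])
  , ((5, 6), [("depth_name", "Intermediate"), ("pages", "80-100"), ("detail", "focused")])
  , ((7, 8), [("depth_name", "Advanced"), ("pages", "50-60"), ("detail", "executive")])
  , ((9, 10), [("depth_name", "Executive"), ("pages", "10-20"), ("detail", "summary")]) ]

-- the 'for level_range, config in depth_map.items()' loop with its early return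
def pvALoop (e : Int) : List ((Int × Int) × List (String × String)) → List (String × String)
  | [] => [("depth_name", "Intermediate"), ("pages", "80-100"), ("detail", "focused")]
  | (r, cfg) :: rest => if r.1 ≤ e ∧ e ≤ r.2 then cfg else pvALoop e rest

def get_expertise_depth_config_py (expertise_level : Int) : List (String × String) :=
  pvALoop expertise_level pvDepthMap

-- ===== PORT B =====
def pvConfigs : List (List (String × String)) :=
  [ [("depth_name", "Foundational"), ("pages", "250-300"), ("detail", "comprehensive")]
  , [("depth_name", "Educational"), ("pages", "150-200"), ("detail", "detailed")]
  , [("depth_name", "Intermediate"), ("pages", "80-100"), ("detail", "focused")]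
  , [("depth_name", "Advanced"), ("pages", "50-60"), ("detail", "executive")]
  , [("depth_name", "Executive"), ("pages", "10-20"), ("detail", "summary")] ]

def get_expertise_depth_config_py_alt (expertise_level : Int) : List (String × String) :=
  let idx := PySem.Int.floordiv (expertise_level - 1) 2
  if 0 ≤ idx ∧ idx ≤ 4 then
    -- configs[idx]: the guard ensures the index is in range, so getD's fallback is never taken
    (PySem.List.pyGet? pvConfigs idx).getD []
  else
    [("depth_name", "Intermediate"), ("pages", "80-100"), ("detail", "focused")]

-- ===== PRECONDITION & SPEC =====
def Spec_get_expertise_depth_config_py (expertise_level : Int) (out : List (String × String)) : Prop := out = get_expertise_depth_config_py_alt expertise_level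
instance (expertise_level : Int) (out : List (String × String)) : Decidable (Spec_get_expertise_depth_config_py expertise_level out) := by unfold Spec_get_expertise_depth_config_py; infer_instance

-- ===== CLAIM (what is proved, stated in full; the proofs are below) =====
def Claim_equal_get_expertise_depth_config_py : Prop := ∀ (expertise_level : Int), Dom_get_expertise_depth_config_py expertise_level → Spec_get_expertise_depth_config_py expertise_level (get_expertise_depth_config_py expertise_level)

-- ===== LEMMAS AND PROOFS =====

theorem pv_idx_eq (e : Int) : PySem.Int.floordiv (e - 1) 2 = (e - 1) / 2 :=
  PySem.Int.floordiv_eq_ediv_of_pos (a := e - 1) (by omega)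

theorem pv_eq (e : Int) : get_expertise_depth_config_py e = get_expertise_depth_config_py_alt e := by
  unfold get_expertise_depth_config_py get_expertise_depth_config_py_alt pvDepthMap
  simp only [pvALoop]
  simp only [pv_idx_eq]
  by_cases h : 1 ≤ e ∧ e ≤ 10
  · -- inside the table: e ∈ [1,10]; check each value
    obtain ⟨h1, h2⟩ := h
    interval_cases e <;> decide
  · -- outside: both sides take their default branch
    rw [if_neg (by omega), if_neg (by omega), if_neg (by omega), if_neg (by omega),
        if_neg (by omega), if_neg (by omega)]

-- ===== VERDICT (by name: the statement is the Claim_ definition above) =====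
theorem get_expertise_depth_config_py_spec : Claim_equal_get_expertise_depth_config_py := by
  intro e _
  exact pv_eq e
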